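-- pv_equiv track=rewrite | github.com/Yuyo1984/atcoder-python | math-and-algorithm/042/main.py | calc
-- ===== SOURCE A (Python) =====
-- def calc(n):
--     divisor_cnt = [0] * (n + 1)
--
--     for i in range(1, n + 1):
--         for j in range(i, n + 1, i):
--             divisor_cnt[j] += 1
--
--     total_sum = 0
--     for i in range(1, n + 1):
--         total_sum += divisor_cnt[i] * i
--     return total_sum
-- ===== SOURCE B (Python) =====
-- def _tri(m):
--     return m * (m + 1) // 2
--
--
-- def calc(n):
--     # Divisor-block (floor) grouping: sum_{i=1..n} i*d(i) = sum_{d=1..n} d * T(n//d),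
--     # evaluated in O(sqrt n) blocks on which n//d is constant.
--     total = 0
--     i = 1
--     while i <= n:
--         v = n // i
--         j = n // v
--         total += (_tri(j) - _tri(i - 1)) * _tri(v)
--         i = j + 1
--     return total
-- ===== Notes on version B (the rewrite author's own statement) =====
-- stated objective: faster
-- what changed: Replaced the O(n log n) divisor-count sieve (array of n+1 counters plus two passes) by the closed-form identity sum_{i<=n} i*d(i) = sum_d d*T(n//d) evaluated with floor/divisor-block grouping in O(sqrt n) with O(1) memory.
import Mathlib
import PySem

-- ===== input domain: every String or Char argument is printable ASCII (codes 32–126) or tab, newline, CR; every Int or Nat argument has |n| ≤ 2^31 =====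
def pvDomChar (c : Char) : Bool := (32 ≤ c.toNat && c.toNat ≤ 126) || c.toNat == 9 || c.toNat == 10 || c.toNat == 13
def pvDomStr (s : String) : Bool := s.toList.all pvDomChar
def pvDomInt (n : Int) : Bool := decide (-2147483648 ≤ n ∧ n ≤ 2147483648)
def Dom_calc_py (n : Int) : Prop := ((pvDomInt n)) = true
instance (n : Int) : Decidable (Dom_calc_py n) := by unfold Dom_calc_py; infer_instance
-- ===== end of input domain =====

-- B replaces A's O(n log n) divisor-count sieve by divisor-block (floor) grouping of the identity
-- sum_{i<=n} i*d(i) = sum_d d*T(n//d); measurably faster, equal on every n (both return 0 for n <= 0).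

-- ===== PORT A =====
-- Python's list here is an array of n+1 counters; every index used (j in range(i, n+1, i) and
-- i in range(1, n+1)) provably lies in [1, n], inside bounds, so Python's in-range indexing
-- divisor_cnt[j] is exactly Array set!/getElem! — no negative-index or IndexError case is reachable.
def calc_py (n : Int) : Int :=
  -- divisor_cnt = [0] * (n + 1)   ([0]*k is empty for k <= 0, exactly replicate k.toNat)
  let cnt0 : Array Int := Array.replicate (n + 1).toNat 0
  -- for i in range(1, n+1): for j in range(i, n+1, i): divisor_cnt[j] += 1
  let cnt : Array Int :=
    (PySem.List.pyRange 1 (n + 1) 1).foldl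
      (fun arr i =>
        (PySem.List.pyRange i (n + 1) i).foldl
          (fun arr j => arr.set! j.toNat (arr[j.toNat]! + 1)) arr)
      cnt0
  -- total_sum = 0; for i in range(1, n+1): total_sum += divisor_cnt[i] * i; return total_sum
  (PySem.List.pyRange 1 (n + 1) 1).foldl
    (fun acc i => acc + cnt[i.toNat]! * i) 0

-- ===== PORT B =====
-- def _tri(m): return m * (m + 1) // 2
def pvTri (m : Int) : Int := PySem.Int.floordiv (m * (m + 1)) 2

-- the 'while i <= n' loop of Source B, totalised with fuel; every executed iteration moves i to
-- n//(n//i) + 1 > i (proved in loopB_spec below), so fuel n.toNat + 1 is never exhausted.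
def pvLoopB (n : Int) : Nat → Int → Int → Int
  | 0, _, total => total
  | fuel + 1, i, total =>
    if i ≤ n then
      let v := PySem.Int.floordiv n i
      let j := PySem.Int.floordiv n v
      pvLoopB n fuel (j + 1) (total + (pvTri j - pvTri (i - 1)) * pvTri v)
    else total

def calc_py_alt (n : Int) : Int := pvLoopB n (n.toNat + 1) 1 0

-- ===== PRECONDITION & SPEC =====
def Spec_calc_py (n : Int) (out : Int) : Prop := out = calc_py_alt n
instance (n : Int) (out : Int) : Decidable (Spec_calc_py n out) := by unfold Spec_calc_py; infer_instance

-- ===== CLAIM (what is proved, stated in full; the proofs are below) =====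
def Claim_equal_calc_py : Prop := ∀ (n : Int), Dom_calc_py n → Spec_calc_py n (calc_py n)

-- ===== LEMMAS AND PROOFS =====

lemma tri_succ (m : Int) : pvTri (m + 1) = pvTri m + (m + 1) := by
  unfold pvTri
  rw [PySem.Int.floordiv_eq_ediv_of_pos (by norm_num), PySem.Int.floordiv_eq_ediv_of_pos (by norm_num)]
  have h : (m + 1) * (m + 1 + 1) = m * (m + 1) + (m + 1) * 2 := by ring
  rw [h, Int.add_mul_ediv_right _ _ (by norm_num)]

-- sum 1..m = pvTri m
lemma sum_id (m : Int) (hm : 0 ≤ m) :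
    ((PySem.List.pyRange 1 (m + 1) 1).map id).sum = pvTri m := by
  induction m, hm using Int.le_induction with
  | base => simp [PySem.List.pyRange_one_eq_nil (by norm_num : (1:Int) ≥ 1)]; decide
  | succ m hm ih =>
      rw [PySem.List.pyRange_one_succ_right (by omega), List.map_append, List.sum_append, ih, tri_succ]
      simp

-- 1 ≤ n/i when 1 ≤ i ≤ n
lemma pv_one_le_div {n i : Int} (hi : 1 ≤ i) (hin : i ≤ n) : 1 ≤ n / i := by
  rw [Int.le_ediv_iff_mul_le (by omega)]; omega

lemma div_mul_le {n i : Int} (hi : 1 ≤ i) : n / i * i ≤ n := by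
  have h1 := Int.emod_nonneg n (by omega : i ≠ 0)
  have h2 := Int.mul_ediv_add_emod n i
  nlinarith

-- i ≤ n/(n/i)
lemma le_div_div {n i : Int} (hi : 1 ≤ i) (hin : i ≤ n) : i ≤ n / (n / i) := by
  have hv := pv_one_le_div hi hin
  rw [Int.le_ediv_iff_mul_le (by omega)]
  have := div_mul_le (n := n) hi
  nlinarith

-- n/(n/i) ≤ n
lemma div_div_le {n i : Int} (hi : 1 ≤ i) (hin : i ≤ n) : n / (n / i) ≤ n := by
  have hv := pv_one_le_div hi hin
  exact Int.ediv_le_self _ (by omega)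

-- constant on the block
lemma div_const {n i d : Int} (hi : 1 ≤ i) (hin : i ≤ n) (hd1 : i ≤ d) (hd2 : d ≤ n / (n / i)) :
    n / d = n / i := by
  have hv := pv_one_le_div hi hin
  have hd : 1 ≤ d := by omega
  -- v ≤ n/d : from d*v ≤ n
  have h1 : d * (n / i) ≤ n := by
    have := (Int.le_ediv_iff_mul_le (by omega : 0 < n / i)).mp hd2
    linarith
  have h2 : n / i ≤ n / d := by
    rw [Int.le_ediv_iff_mul_le (by omega)]; nlinarith
  -- n/d ≤ v : else (v+1)*i ≤ (v+1)*d ≤ n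
  have h3 : n / d ≤ n / i := by
    by_contra h
    push Not at h
    have h4 : (n / i + 1) * d ≤ n :=
      (Int.le_ediv_iff_mul_le (by omega : 0 < d)).mp (by omega)
    have h6 : (n / i + 1) * i ≤ n := by nlinarith
    have := (Int.le_ediv_iff_mul_le (by omega : 0 < i)).mpr h6
    omega
  omega

-- the common mathematical value: d * T(n // d), summed over d, as a list sum
def pvF (n d : Int) : Int := d * pvTri (PySem.Int.floordiv n d)

def pvS (n i : Int) : Int := ((PySem.List.pyRange i (n + 1) 1).map (pvF n)).sum

lemma sum_block {n i : Int} (hi : 1 ≤ i) (hin : i ≤ n) :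
    ((PySem.List.pyRange i (n / (n / i) + 1) 1).map (pvF n)).sum
      = (pvTri (n / (n / i)) - pvTri (i - 1)) * pvTri (n / i) := by
  have hv := pv_one_le_div hi hin
  have hj1 : i ≤ n / (n / i) := le_div_div hi hin
  have hj2 : n / (n / i) ≤ n := div_div_le hi hin
  have hcongr : ((PySem.List.pyRange i (n / (n / i) + 1) 1).map (pvF n))
      = ((PySem.List.pyRange i (n / (n / i) + 1) 1).map (fun d => d * pvTri (n / i))) := by
    apply List.map_congr_left
    intro d hd
    rw [PySem.List.mem_pyRange_one] at hd
    unfold pvF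
    rw [PySem.Int.floordiv_eq_ediv_of_pos (by omega : (0:Int) < d),
        div_const hi hin hd.1 (by omega)]
  rw [hcongr, List.sum_map_mul_right]
  simp only [List.map_id']
  have hall := sum_id (n / (n / i)) (by omega)
  rw [PySem.List.pyRange_one_append 1 i (n / (n / i) + 1) (by omega) (by omega),
      List.map_append, List.sum_append] at hall
  have hpre : ((PySem.List.pyRange 1 i 1).map id).sum = pvTri (i - 1) := by
    have h2 := sum_id (i - 1) (by omega)
    have h3 : PySem.List.pyRange 1 i 1 = PySem.List.pyRange 1 (i - 1 + 1) 1 := by norm_num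
    rw [h3]; exact h2
  rw [hpre] at hall
  simp only [List.map_id] at hall
  have hsum : (PySem.List.pyRange i (n / (n / i) + 1) 1).sum
      = pvTri (n / (n / i)) - pvTri (i - 1) := by linarith
  rw [hsum]

lemma loopB_spec (n : Int) : ∀ (fuel : Nat) (i total : Int), 1 ≤ i → (n + 1 - i).toNat ≤ fuel →
    pvLoopB n fuel i total = total + pvS n i := by
  intro fuel
  induction fuel with
  | zero =>
      intro i total h1 h2
      have h3 : n + 1 ≤ i := by omega
      simp [pvLoopB, pvS, PySem.List.pyRange_one_eq_nil h3]
  | succ f ih =>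
      intro i total h1 h2
      by_cases hin : i ≤ n
      · have hv0 : (0:Int) < n / i := by have := pv_one_le_div h1 hin; omega
        have hj1 : i ≤ n / (n / i) := le_div_div h1 hin
        have hj2 : n / (n / i) ≤ n := div_div_le h1 hin
        have hstep : pvLoopB n (f + 1) i total
            = pvLoopB n f (n / (n / i) + 1)
                (total + (pvTri (n / (n / i)) - pvTri (i - 1)) * pvTri (n / i)) := by
          simp only [pvLoopB, if_pos hin,
            PySem.Int.floordiv_eq_ediv_of_pos (by omega : (0:Int) < i),
            PySem.Int.floordiv_eq_ediv_of_pos hv0]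
        rw [hstep, ih _ _ (by omega) (by omega)]
        have hsplit : pvS n i = ((PySem.List.pyRange i (n / (n / i) + 1) 1).map (pvF n)).sum + pvS n (n / (n / i) + 1) := by
          unfold pvS
          rw [← List.sum_append, ← List.map_append,
              ← PySem.List.pyRange_one_append i (n / (n / i) + 1) (n + 1) (by omega) (by omega)]
        rw [hsplit, sum_block h1 hin]
        ring
      · have h3 : n + 1 ≤ i := by omega
        simp [pvLoopB, hin, pvS, PySem.List.pyRange_one_eq_nil h3]

lemma alt_eq_S (n : Int) : pvLoopB n (n.toNat + 1) 1 0 = pvS n 1 := by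
  rw [loopB_spec n (n.toNat + 1) 1 0 (by omega) (by omega)]
  simp

def pvW (c : List Int) : Int := ∑ k ∈ Finset.range c.length, (k : Int) * c.getD k 0

lemma W_replicate (m : Nat) : pvW (List.replicate m (0:Int)) = 0 := by
  unfold pvW
  apply Finset.sum_eq_zero
  intro k _
  simp

lemma getD_set (c : List Int) (t : Nat) (k : Nat) (hk : k < c.length) (v : Int) :
    (c.set t v).getD k 0 = if k = t then v else c.getD k 0 := by
  rw [List.getD_eq_getElem _ _ (by rwa [List.length_set]), List.getD_eq_getElem _ _ hk, List.getElem_set]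
  by_cases h2 : t = k
  · simp [h2]
  · simp [h2, Ne.symm h2]

lemma W_update (c : List Int) (j : Int) (h0 : 1 ≤ j) (h1 : j < (c.length : Int)) :
    pvW (c.set j.toNat (c.getD j.toNat 0 + 1)) = pvW c + j := by
  have htl : j.toNat < c.length := by omega
  have hjt : (j.toNat : Int) = j := by omega
  unfold pvW
  rw [List.length_set]
  have key : ∀ k ∈ Finset.range c.length,
      (k:Int) * (c.set j.toNat (c.getD j.toNat 0 + 1)).getD k 0
        = (k:Int) * c.getD k 0 + (if k = j.toNat then (j.toNat:Int) else 0) := by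
    intro k hk
    rw [Finset.mem_range] at hk
    rw [getD_set c j.toNat k hk]
    by_cases h : k = j.toNat
    · subst h
      rw [if_pos rfl, if_pos rfl]
      ring
    · rw [if_neg h, if_neg h]
      ring
  rw [Finset.sum_congr rfl key, Finset.sum_add_distrib,
      Finset.sum_ite_eq' (Finset.range c.length) j.toNat (fun _ => (j.toNat:Int))]
  rw [if_pos (Finset.mem_range.mpr htl), hjt]

lemma step_bridge (c : Array Int) (j : Int) (h0 : 1 ≤ j) (h1 : j < (c.size : Int)) :
    (c.set! j.toNat (getElem! c j.toNat + 1)).toList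
      = c.toList.set j.toNat (c.toList.getD j.toNat 0 + 1) := by
  have htl : j.toNat < c.size := by omega
  rw [getElem!_pos c j.toNat htl, Array.set!]
  rw [Array.toList_setIfInBounds]
  congr 1
  rw [List.getD_eq_getElem _ _ (by simpa using htl)]
  simp [Array.getElem_toList]

lemma inner_spec (js : List Int) : ∀ (c : Array Int), (∀ j ∈ js, 1 ≤ j ∧ j < (c.size : Int)) →
    (js.foldl (fun arr j => arr.set! j.toNat (arr[j.toNat]! + 1)) c).size = c.size ∧
    pvW (js.foldl (fun arr j => arr.set! j.toNat (arr[j.toNat]! + 1)) c).toList = pvW c.toList + js.sum := by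
  induction js with
  | nil => intro c _; simp
  | cons j js ih =>
      intro c hb
      simp only [List.foldl_cons]
      have hj := hb j (by simp)
      have hlen : (c.set! j.toNat (getElem! c j.toNat + 1)).size = c.size := Array.size_set! ..
      obtain ⟨l1, w1⟩ := ih _ (by intro x hx; rw [hlen]; exact hb x (List.mem_cons_of_mem _ hx))
      refine ⟨by rw [l1, hlen], ?_⟩
      rw [w1, step_bridge c j hj.1 hj.2, W_update c.toList j hj.1 (by simpa using hj.2), List.sum_cons]
      ring

lemma outer_spec (n : Int) (is : List Int) : ∀ (c : Array Int), (∀ i ∈ is, 1 ≤ i) → (c.size : Int) = n + 1 →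
    ((is.foldl (fun c i => (PySem.List.pyRange i (n+1) i).foldl
        (fun arr j => arr.set! j.toNat (arr[j.toNat]! + 1)) c) c).size : Int) = n + 1 ∧
    pvW (is.foldl (fun c i => (PySem.List.pyRange i (n+1) i).foldl
        (fun arr j => arr.set! j.toNat (arr[j.toNat]! + 1)) c) c).toList
      = pvW c.toList + (is.map (fun i => (PySem.List.pyRange i (n+1) i).sum)).sum := by
  induction is with
  | nil => intro c _ hl; exact ⟨hl, by simp⟩
  | cons i is ih =>
      intro c hb hl
      simp only [List.foldl_cons]
      have hi := hb i (by simp)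
      have hbound : ∀ j ∈ PySem.List.pyRange i (n+1) i, 1 ≤ j ∧ j < (c.size : Int) := by
        intro j hj
        rw [PySem.List.mem_pyRange_iff_of_pos (by omega)] at hj
        exact ⟨by omega, by omega⟩
      obtain ⟨l1, w1⟩ := inner_spec (PySem.List.pyRange i (n+1) i) c hbound
      obtain ⟨l2, w2⟩ := ih _ (fun x hx => hb x (List.mem_cons_of_mem _ hx)) (by rw [l1]; exact hl)
      refine ⟨l2, ?_⟩
      rw [w2, w1, List.map_cons, List.sum_cons]
      ring

lemma range_step (n i : Int) (hi : 0 < i) :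
    PySem.List.pyRange i (n + 1) i = (PySem.List.pyRange 1 (n / i + 1) 1).map (fun x => i * x) := by
  rw [PySem.List.pyRange_of_pos _ _ hi, PySem.List.pyRange_one]
  have harg : (n + 1 - i + i - 1) = n := by ring
  have hc2 : (n / i + 1 - 1).toNat = (n / i).toNat := by omega
  rw [hc2, List.map_map]
  by_cases h : i < n + 1
  · rw [if_pos h, harg]
    apply List.map_congr_left
    intro k _
    simp only [Function.comp]
    ring
  · rw [if_neg h]
    have hz : (n / i).toNat = 0 := by
      by_cases h0 : 0 ≤ n
      · rw [Int.ediv_eq_zero_of_lt h0 (by omega)]; rfl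
      · have := Int.ediv_neg_of_neg_of_pos (by omega : n < 0) hi
        omega
    rw [hz]
    simp

lemma sum_step (n i : Int) (hi : 1 ≤ i) (hn : 0 ≤ n) :
    (PySem.List.pyRange i (n + 1) i).sum = pvF n i := by
  rw [range_step n i (by omega)]
  have hm := List.sum_map_mul_left (PySem.List.pyRange 1 (n / i + 1) 1) (fun x => x) i
  simp only [List.map_id'] at hm
  rw [hm]
  unfold pvF
  rw [PySem.Int.floordiv_eq_ediv_of_pos (by omega)]
  have hs := sum_id (n / i) (Int.ediv_nonneg hn (by omega))
  simp only [List.map_id] at hs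
  rw [hs]

lemma readout (n : Int) (hn : 0 ≤ n) (c : List Int) (hl : (c.length : Int) = n + 1) :
    ((PySem.List.pyRange 1 (n + 1) 1).map (fun i => c.getD i.toNat 0 * i)).sum = pvW c := by
  unfold pvW
  have hL : c.length = n.toNat + 1 := by omega
  rw [hL, Finset.sum_range_succ']
  rw [PySem.List.pyRange_one]
  have h1 : (n + 1 - 1).toNat = n.toNat := by omega
  rw [h1, List.map_map]
  have hlist : ∀ (m : Nat) (f : Nat → Int), ((List.range m).map f).sum = ∑ k ∈ Finset.range m, f k :=
    fun m f => rfl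
  rw [hlist]
  have : ∀ k ∈ Finset.range n.toNat,
      ((fun i => c.getD i.toNat 0 * i) ∘ fun k : Nat => 1 + (k:Int)) k
        = ((k:Int) + 1) * c.getD (k + 1) 0 := by
    intro k _
    simp only [Function.comp]
    have hcast : ((1:Int) + (k:Int)).toNat = k + 1 := by omega
    rw [hcast]
    ring
  rw [Finset.sum_congr rfl this]
  push_cast
  ring_nf

lemma readoutA (n : Int) (hn : 0 ≤ n) (c : Array Int) (hl : (c.size : Int) = n + 1) :
    ((PySem.List.pyRange 1 (n + 1) 1).map (fun i => getElem! c i.toNat * i)).sum = pvW c.toList := by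
  have hmap : (PySem.List.pyRange 1 (n + 1) 1).map (fun i => getElem! c i.toNat * i)
      = (PySem.List.pyRange 1 (n + 1) 1).map (fun i => c.toList.getD i.toNat 0 * i) := by
    apply List.map_congr_left
    intro i hi
    rw [PySem.List.mem_pyRange_one] at hi
    have htl : i.toNat < c.size := by omega
    rw [getElem!_pos c i.toNat htl, List.getD_eq_getElem _ _ (by simpa using htl)]
    simp [Array.getElem_toList]
  rw [hmap]
  exact readout n hn c.toList (by simpa using hl)

theorem main_eq (n : Int) : calc_py n = calc_py_alt n := by
  have halt : calc_py_alt n = pvS n 1 := alt_eq_S n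
  rw [halt]
  by_cases hn : 0 < n
  · simp only [calc_py]
    have h1 : ∀ i ∈ PySem.List.pyRange 1 (n + 1) 1, 1 ≤ i := by
      intro i hi
      rw [PySem.List.mem_pyRange_one] at hi
      omega
    have hl0 : (((Array.replicate (n + 1).toNat (0:Int)).size : Nat) : Int) = n + 1 := by
      rw [Array.size_replicate]; omega
    obtain ⟨hlen, hW⟩ := outer_spec n (PySem.List.pyRange 1 (n + 1) 1) _ h1 hl0
    rw [PySem.List.foldl_add, readoutA n (by omega) _ hlen, hW, Array.toList_replicate, W_replicate]
    have hmap : (PySem.List.pyRange 1 (n + 1) 1).map (fun i => (PySem.List.pyRange i (n + 1) i).sum)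
        = (PySem.List.pyRange 1 (n + 1) 1).map (pvF n) := by
      apply List.map_congr_left
      intro i hi
      rw [PySem.List.mem_pyRange_one] at hi
      exact sum_step n i (by omega) (by omega)
    rw [hmap]
    unfold pvS
    ring
  · have hnil : PySem.List.pyRange 1 (n + 1) 1 = [] := PySem.List.pyRange_one_eq_nil (by omega)
    simp only [calc_py, pvS, hnil, List.foldl_nil, List.map_nil, List.sum_nil]


-- ===== VERDICT (by name: the statement is the Claim_ definition above) =====
theorem calc_py_spec : Claim_equal_calc_py := by
  intro n _
  unfold Spec_calc_py
  exact main_eq n
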